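-- pv_equiv track=rewrite | github.com/Juan-David-Obando-Novoa/Dalgo-Proyecto-2 | proyecto2.py | crearmatrizAdyacencia
-- ===== SOURCE A (Python) =====
-- def crearmatrizAdyacencia(compuestos_fund):
--     n = len(compuestos_fund)
--     matrizAdyacencia = [[0]*n for _ in range(n)]
--     for i in range(n):
--         for j in range(i+1, n):  # Comienza desde i+1 para evitar conexiones bidireccionales
--             if len(compuestos_fund[i]) >= 2 and len(compuestos_fund[j]) >= 2:
--                 if (compuestos_fund[i][0] == compuestos_fund[j][0] or compuestos_fund[i][1] == compuestos_fund[j][1] or compuestos_fund[i][1] == compuestos_fund[j][0] or compuestos_fund[i][0] == compuestos_fund[j][1]) and sum(matrizAdyacencia[i]) < 2: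
--                     matrizAdyacencia[i][j] = 1
--     return matrizAdyacencia
-- ===== SOURCE B (Python) =====
-- def crearmatrizAdyacencia(compuestos_fund):
--     n = len(compuestos_fund)
--     buckets = {}
--     for i, s in enumerate(compuestos_fund):
--         if len(s) >= 2:
--             buckets.setdefault(s[0], []).append(i)
--             if s[1] != s[0]:
--                 buckets.setdefault(s[1], []).append(i)
--     matriz = []
--     for i, s in enumerate(compuestos_fund):
--         row = [0] * n
--         if len(s) >= 2:
--             cand = sorted(set(buckets.get(s[0], []) + buckets.get(s[1], [])))
--             for j in [j for j in cand if j > i][:2]: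
--                 row[j] = 1
--         matriz.append(row)
--     return matriz
-- ===== Notes on version B (the rewrite author's own statement) =====
-- stated objective: faster
-- what changed: Replaces A's nested j-scan with an in-row running cap (which re-evaluates sum(row) on every character match) by a dictionary mapping each endpoint character to the list of row indices holding it, built in one pass; each row then merges, dedups and sorts its two buckets and keeps the first two partners above the diagonal.
import Mathlib
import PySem

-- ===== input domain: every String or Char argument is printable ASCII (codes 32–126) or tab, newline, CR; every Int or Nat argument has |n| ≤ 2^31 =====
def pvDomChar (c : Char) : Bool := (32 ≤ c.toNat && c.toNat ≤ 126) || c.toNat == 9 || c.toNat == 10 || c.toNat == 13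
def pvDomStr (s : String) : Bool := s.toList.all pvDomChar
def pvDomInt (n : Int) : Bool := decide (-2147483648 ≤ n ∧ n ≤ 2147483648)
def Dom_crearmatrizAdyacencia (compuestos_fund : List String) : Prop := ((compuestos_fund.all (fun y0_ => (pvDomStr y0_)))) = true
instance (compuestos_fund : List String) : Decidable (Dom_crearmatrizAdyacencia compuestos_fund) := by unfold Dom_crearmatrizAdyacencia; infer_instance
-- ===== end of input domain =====

-- B replaces A's quadratic scan (which re-sums the current row on every char match) by an
-- endpoint→indices bucket dictionary built in one pass; per row it merges, dedups and sorts the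
-- two buckets and keeps the first two partners above the diagonal.

-- ===== PORT A =====
def crearmatrizAdyacencia (compuestos_fund : List String) : List (List Int) :=
  let n := compuestos_fund.length
  let m0 : List (List Int) := (List.range n).map (fun _ => List.replicate n (0 : Int))
  (List.range n).foldl (fun M i =>
    (List.range' (i + 1) (n - (i + 1))).foldl (fun M j =>
      if 2 ≤ (compuestos_fund.getD i "").toList.length ∧ 2 ≤ (compuestos_fund.getD j "").toList.length then
        if ((compuestos_fund.getD i "").toList.getD 0 ' ' = (compuestos_fund.getD j "").toList.getD 0 ' ' ∨
            (compuestos_fund.getD i "").toList.getD 1 ' ' = (compuestos_fund.getD j "").toList.getD 1 ' ' ∨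
            (compuestos_fund.getD i "").toList.getD 1 ' ' = (compuestos_fund.getD j "").toList.getD 0 ' ' ∨
            (compuestos_fund.getD i "").toList.getD 0 ' ' = (compuestos_fund.getD j "").toList.getD 1 ' ')
           ∧ (M.getD i []).sum < 2
        then M.modify i (fun row => row.set j 1) else M
      else M) M) m0

-- ===== PORT B =====
-- helper: one build step of the endpoint buckets ('buckets.setdefault(s[0],[]).append(i)' …)
def pvBStep (d : PySem.Dict Char (List Nat)) (si : String × Nat) : PySem.Dict Char (List Nat) :=
  if 2 ≤ si.1.toList.length then
    let a := si.1.toList.getD 0 ' '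
    let b := si.1.toList.getD 1 ' '
    let d1 := d.insert a (d.getD a [] ++ [si.2])
    if b ≠ a then d1.insert b (d1.getD b [] ++ [si.2]) else d1
  else d

def crearmatrizAdyacencia_alt (compuestos_fund : List String) : List (List Int) :=
  let n := compuestos_fund.length
  let buckets := compuestos_fund.zipIdx.foldl pvBStep PySem.Dict.empty
  compuestos_fund.zipIdx.foldl (fun matriz si =>
    let row := List.replicate n (0 : Int)
    let row :=
      if 2 ≤ si.1.toList.length then
        let cand := PySem.List.sorted
          (PySem.Set.ofList (buckets.getD (si.1.toList.getD 0 ' ') [] ++ buckets.getD (si.1.toList.getD 1 ' ') []))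
          (fun x => x) false
        ((cand.filter (fun j => si.2 < j)).take 2).foldl (fun r j => r.set j 1) row
      else row
    matriz ++ [row]) []

-- ===== PRECONDITION & SPEC =====
def Spec_crearmatrizAdyacencia (compuestos_fund : List String) (out : List (List Int)) : Prop := out = crearmatrizAdyacencia_alt compuestos_fund
instance (compuestos_fund : List String) (out : List (List Int)) : Decidable (Spec_crearmatrizAdyacencia compuestos_fund out) := by unfold Spec_crearmatrizAdyacencia; infer_instance

-- ===== CLAIM (what is proved, stated in full; the proofs are below) =====
def Claim_equal_crearmatrizAdyacencia : Prop := ∀ (compuestos_fund : List String), Dom_crearmatrizAdyacencia compuestos_fund → Spec_crearmatrizAdyacencia compuestos_fund (crearmatrizAdyacencia compuestos_fund)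

-- ===== LEMMAS AND PROOFS =====

-- the match predicate of A's inner scan, as a Bool on the two indices
def pvP (cs : List String) (i j : Nat) : Bool :=
  decide ((2 ≤ (cs.getD i "").toList.length ∧ 2 ≤ (cs.getD j "").toList.length) ∧
    ((cs.getD i "").toList.getD 0 ' ' = (cs.getD j "").toList.getD 0 ' ' ∨
     (cs.getD i "").toList.getD 1 ' ' = (cs.getD j "").toList.getD 1 ' ' ∨
     (cs.getD i "").toList.getD 1 ' ' = (cs.getD j "").toList.getD 0 ' ' ∨
     (cs.getD i "").toList.getD 0 ' ' = (cs.getD j "").toList.getD 1 ' '))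

def pvSetOnes (row : List Int) (js : List Nat) : List Int := js.foldl (fun r j => r.set j 1) row

-- the row that both programs produce at index i
def pvRow (cs : List String) (i : Nat) : List Int :=
  pvSetOnes (List.replicate cs.length (0 : Int))
    ((((List.range' (i + 1) (cs.length - (i + 1))).filter (pvP cs i))).take 2)

lemma pv_modify_id (M : List (List Int)) (i : Nat) : M.modify i id = M := by
  apply List.ext_getElem?
  intro k
  simp

lemma pv_modify_modify (M : List (List Int)) (i : Nat) (f g : List Int → List Int) :
    (M.modify i f).modify i g = M.modify i (fun row => g (f row)) := by
  apply List.ext_getElem?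
  intro k
  simp only [List.getElem?_modify]
  cases M[k]? with
  | none => rfl
  | some r => by_cases h : i = k <;> simp [h]

lemma pv_modify_congr (M : List (List Int)) (i : Nat) (f g : List Int → List Int)
    (h : ∀ hi : i < M.length, f M[i] = g M[i]) : M.modify i f = M.modify i g := by
  apply List.ext_getElem?
  intro k
  simp only [List.getElem?_modify]
  by_cases hik : i = k
  · subst hik
    by_cases hi : i < M.length
    · rw [List.getElem?_eq_getElem hi]
      simp [h hi]
    · rw [List.getElem?_eq_none (by omega)]
      rfl
  · cases M[k]? with
    | none => rfl
    | some r => simp [hik]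

-- A's inner loop only touches row i: it is a 'modify i' of a fold over that row
lemma pv_inner_eq (C : List Int → Nat → Bool) (i : Nat) :
    ∀ (js : List Nat) (M : List (List Int)),
      js.foldl (fun M j => if C (M.getD i []) j then M.modify i (fun row => row.set j 1) else M) M
        = M.modify i (fun row => js.foldl (fun r j => if C r j then r.set j 1 else r) row) := by
  intro js
  induction js with
  | nil => intro M; exact (pv_modify_id M i).symm
  | cons j js ih =>
    intro M
    simp only [List.foldl_cons]
    by_cases hC : C (M.getD i []) j
    · rw [if_pos hC, ih, pv_modify_modify]
      apply pv_modify_congr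
      intro hi
      rw [show M.getD i [] = M[i] from List.getD_eq_getElem M [] hi] at hC
      simp [hC]
    · rw [if_neg hC, ih]
      apply pv_modify_congr
      intro hi
      rw [show M.getD i [] = M[i] from List.getD_eq_getElem M [] hi] at hC
      simp [hC]

-- independent per-row updates over distinct indices
lemma pv_foldl_modify_getElem? (g : Nat → List Int → List Int) :
    ∀ (l : List Nat), l.Nodup → ∀ (M : List (List Int)) (k : Nat),
      (l.foldl (fun M i => M.modify i (g i)) M)[k]? = if k ∈ l then M[k]?.map (g k) else M[k]? := by
  intro l
  induction l with
  | nil => intro _ M k; simp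
  | cons i l ih =>
    intro hnd M k
    have hnd' := hnd.of_cons
    have hni : i ∉ l := (List.nodup_cons.mp hnd).1
    simp only [List.foldl_cons]
    rw [ih hnd']
    by_cases hkl : k ∈ l
    · have hki : i ≠ k := fun h => hni (h ▸ hkl)
      simp [hkl, hki, List.mem_cons]
    · by_cases hki : k = i
      · subst hki
        simp [hkl]
      · have hik : i ≠ k := fun h => hki h.symm
        simp [hkl, hik, List.mem_cons, hki]

-- (row.set j 1).sum = row.sum + 1 on a fresh position
lemma pv_sum_set_fresh (row : List Int) (j : Nat) (hj : j < row.length) (h0 : row[j] = 0) :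
    (row.set j 1).sum = row.sum + 1 := by
  have hd : row.drop j = row[j] :: row.drop (j + 1) := List.drop_eq_getElem_cons hj
  have hs : (row.take j).sum + (row.drop j).sum = row.sum := List.sum_take_add_sum_drop row j
  rw [hd, h0] at hs
  simp only [List.sum_cons, zero_add] at hs
  rw [List.sum_set]
  rw [if_pos hj]
  omega

-- the capped scan keeps the first (2 - c) matches
lemma pv_rowfold (p : Nat → Bool) :
    ∀ (js : List Nat) (row : List Int) (c : Nat), js.Nodup →
      (∀ j ∈ js, ∃ h : j < row.length, row[j] = 0) → row.sum = (c : Int) →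
      js.foldl (fun r j => if p j && decide (r.sum < 2) then r.set j 1 else r) row
        = pvSetOnes row ((js.filter p).take (2 - c)) := by
  intro js
  induction js with
  | nil => intro row c _ _ _; simp [pvSetOnes]
  | cons j js ih =>
    intro row c hnd hfresh hsum
    have hnd' := hnd.of_cons
    have hnj : j ∉ js := (List.nodup_cons.mp hnd).1
    obtain ⟨hjlen, hj0⟩ := hfresh j (List.mem_cons_self)
    simp only [List.foldl_cons]
    by_cases hp : p j
    · by_cases hc : c < 2
      · have hcond : (p j && decide (row.sum < 2)) = true := by
          rw [hp, hsum]; simp; omega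
        rw [if_pos hcond]
        have hfresh' : ∀ j' ∈ js, ∃ h : j' < (row.set j 1).length, (row.set j 1)[j'] = 0 := by
          intro j' hj'
          obtain ⟨hl, h0⟩ := hfresh j' (List.mem_cons_of_mem _ hj')
          have hne : j ≠ j' := fun h => hnj (h ▸ hj')
          refine ⟨by simpa using hl, ?_⟩
          rw [List.getElem_set_ne hne]
          exact h0
        have hsum' : (row.set j 1).sum = ((c + 1 : Nat) : Int) := by
          rw [pv_sum_set_fresh row j hjlen hj0, hsum]; push_cast; ring
        rw [ih (row.set j 1) (c + 1) hnd' hfresh' hsum']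
        have htake : ((j :: js).filter p).take (2 - c) = j :: (js.filter p).take (2 - (c + 1)) := by
          rw [List.filter_cons_of_pos hp]
          have : 2 - c = (2 - (c + 1)) + 1 := by omega
          rw [this, List.take_succ_cons]
        rw [htake]
        rfl
      · have h2 : ¬ row.sum ≤ 1 := by rw [hsum]; omega
        rw [if_neg (fun h => h2 (by simp at h; exact h.2))]
        have hfresh' : ∀ j' ∈ js, ∃ h : j' < row.length, row[j'] = 0 :=
          fun j' hj' => hfresh j' (List.mem_cons_of_mem _ hj')
        rw [ih row c hnd' hfresh' hsum]
        have h20 : 2 - c = 0 := by omega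
        simp [h20, pvSetOnes]
    · rw [if_neg (fun h => hp (by simp at h; exact h.1))]
      have hfresh' : ∀ j' ∈ js, ∃ h : j' < row.length, row[j'] = 0 :=
        fun j' hj' => hfresh j' (List.mem_cons_of_mem _ hj')
      rw [ih row c hnd' hfresh' hsum]
      have hf : List.filter p (j :: js) = List.filter p js := by simp [hp]
      rw [hf]

-- A computes pvRow at every index
lemma pvA_char (cs : List String) :
    crearmatrizAdyacencia cs = (List.range cs.length).map (pvRow cs) := by
  have hmain :
      (List.range cs.length).foldl
        (fun M i =>
          (List.range' (i + 1) (cs.length - (i + 1))).foldl (fun M j =>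
            if 2 ≤ (cs.getD i "").toList.length ∧ 2 ≤ (cs.getD j "").toList.length then
              if ((cs.getD i "").toList.getD 0 ' ' = (cs.getD j "").toList.getD 0 ' ' ∨
                  (cs.getD i "").toList.getD 1 ' ' = (cs.getD j "").toList.getD 1 ' ' ∨
                  (cs.getD i "").toList.getD 1 ' ' = (cs.getD j "").toList.getD 0 ' ' ∨
                  (cs.getD i "").toList.getD 0 ' ' = (cs.getD j "").toList.getD 1 ' ')
                 ∧ (M.getD i []).sum < 2
              then M.modify i (fun row => row.set j 1) else M
            else M) M)
        ((List.range cs.length).map (fun _ => List.replicate cs.length (0 : Int)))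
      = (List.range cs.length).map (pvRow cs) := by
    have hstep : (fun (M : List (List Int)) (i : Nat) =>
        (List.range' (i + 1) (cs.length - (i + 1))).foldl (fun M j =>
            if 2 ≤ (cs.getD i "").toList.length ∧ 2 ≤ (cs.getD j "").toList.length then
              if ((cs.getD i "").toList.getD 0 ' ' = (cs.getD j "").toList.getD 0 ' ' ∨
                  (cs.getD i "").toList.getD 1 ' ' = (cs.getD j "").toList.getD 1 ' ' ∨
                  (cs.getD i "").toList.getD 1 ' ' = (cs.getD j "").toList.getD 0 ' ' ∨
                  (cs.getD i "").toList.getD 0 ' ' = (cs.getD j "").toList.getD 1 ' ')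
                 ∧ (M.getD i []).sum < 2
              then M.modify i (fun row => row.set j 1) else M
            else M) M)
        = (fun M i => M.modify i (fun row =>
            (List.range' (i + 1) (cs.length - (i + 1))).foldl
              (fun r j => if pvP cs i j && decide (r.sum < 2) then r.set j 1 else r) row)) := by
      funext M i
      have hin : (fun (M : List (List Int)) (j : Nat) =>
            if 2 ≤ (cs.getD i "").toList.length ∧ 2 ≤ (cs.getD j "").toList.length then
              if ((cs.getD i "").toList.getD 0 ' ' = (cs.getD j "").toList.getD 0 ' ' ∨
                  (cs.getD i "").toList.getD 1 ' ' = (cs.getD j "").toList.getD 1 ' ' ∨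
                  (cs.getD i "").toList.getD 1 ' ' = (cs.getD j "").toList.getD 0 ' ' ∨
                  (cs.getD i "").toList.getD 0 ' ' = (cs.getD j "").toList.getD 1 ' ')
                 ∧ (M.getD i []).sum < 2
              then M.modify i (fun row => row.set j 1) else M
            else M)
          = (fun (M : List (List Int)) (j : Nat) =>
              if (fun (r : List Int) (j : Nat) => pvP cs i j && decide (r.sum < 2)) (M.getD i []) j
              then M.modify i (fun row => row.set j 1) else M) := by
        funext M j
        simp only []
        by_cases h1 : 2 ≤ (cs.getD i "").toList.length ∧ 2 ≤ (cs.getD j "").toList.length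
        · by_cases h2 : ((cs.getD i "").toList.getD 0 ' ' = (cs.getD j "").toList.getD 0 ' ' ∨
              (cs.getD i "").toList.getD 1 ' ' = (cs.getD j "").toList.getD 1 ' ' ∨
              (cs.getD i "").toList.getD 1 ' ' = (cs.getD j "").toList.getD 0 ' ' ∨
              (cs.getD i "").toList.getD 0 ' ' = (cs.getD j "").toList.getD 1 ' ')
          · by_cases h3 : (M.getD i []).sum < 2
            · rw [if_pos h1, if_pos ⟨h2, h3⟩, if_pos]
              simp only [pvP, Bool.and_eq_true, decide_eq_true_eq]
              exact ⟨⟨h1, h2⟩, h3⟩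
            · rw [if_pos h1, if_neg (fun hc => h3 hc.2), if_neg]
              intro hb
              simp only [pvP, Bool.and_eq_true, decide_eq_true_eq] at hb
              exact h3 hb.2
          · rw [if_pos h1, if_neg (fun hc => h2 hc.1), if_neg]
            intro hb
            simp only [pvP, Bool.and_eq_true, decide_eq_true_eq] at hb
            exact h2 hb.1.2
        · rw [if_neg h1, if_neg]
          intro hb
          simp only [pvP, Bool.and_eq_true, decide_eq_true_eq] at hb
          exact h1 hb.1.1
      rw [hin]
      exact pv_inner_eq (fun r j => pvP cs i j && decide (r.sum < 2)) i
        (List.range' (i + 1) (cs.length - (i + 1))) M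
    rw [hstep]
    apply List.ext_getElem?
    intro k
    rw [pv_foldl_modify_getElem? _ _ (List.nodup_range)]
    by_cases hk : k < cs.length
    · rw [if_pos (List.mem_range.mpr hk)]
      rw [List.getElem?_map, List.getElem?_map, List.getElem?_range hk]
      simp only [Option.map_some]
      congr 1
      rw [pv_rowfold (pvP cs k) _ _ 0 (List.nodup_range' 1)
        (fun j hj => ?_) (by simp)]
      · rfl
      · obtain ⟨t, ht, rfl⟩ := List.mem_range'.mp hj
        refine ⟨by simp; omega, List.getElem_replicate _⟩
    · have hk' : ¬ k ∈ List.range cs.length := by simpa using hk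
      rw [if_neg hk']
      rw [List.getElem?_map, List.getElem?_map]
      rw [List.getElem?_eq_none (by simpa using hk)]
      rfl
  exact hmain

-- membership in the endpoint buckets
lemma pv_bucket_step_mem (d : PySem.Dict Char (List Nat)) (si : String × Nat) (c : Char) (j : Nat) :
    j ∈ (pvBStep d si).getD c [] ↔
      j ∈ d.getD c [] ∨ (si.2 = j ∧ 2 ≤ si.1.toList.length ∧
        (si.1.toList.getD 0 ' ' = c ∨ si.1.toList.getD 1 ' ' = c)) := by
  by_cases hlen : 2 ≤ si.1.toList.length
  · have he : pvBStep d si =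
        (if si.1.toList.getD 1 ' ' ≠ si.1.toList.getD 0 ' ' then
          (d.insert (si.1.toList.getD 0 ' ') (d.getD (si.1.toList.getD 0 ' ') [] ++ [si.2])).insert
            (si.1.toList.getD 1 ' ')
            ((d.insert (si.1.toList.getD 0 ' ')
              (d.getD (si.1.toList.getD 0 ' ') [] ++ [si.2])).getD (si.1.toList.getD 1 ' ') [] ++ [si.2])
        else d.insert (si.1.toList.getD 0 ' ') (d.getD (si.1.toList.getD 0 ' ') [] ++ [si.2])) := by
      unfold pvBStep
      rw [if_pos hlen]
    rw [he]
    by_cases hba : si.1.toList.getD 1 ' ' ≠ si.1.toList.getD 0 ' '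
    · rw [if_pos hba]
      simp only [PySem.Dict.getD_insert]
      rw [if_neg hba]
      by_cases hcb : c = si.1.toList.getD 1 ' '
      · rw [if_pos hcb]
        simp only [List.mem_append, List.mem_singleton]
        constructor
        · rintro (h | h)
          · rw [hcb]; exact Or.inl h
          · exact Or.inr ⟨h.symm, hlen, Or.inr hcb.symm⟩
        · rintro (h | ⟨h, _, _⟩)
          · rw [hcb] at h; exact Or.inl h
          · exact Or.inr h.symm
      · rw [if_neg hcb]
        by_cases hca : c = si.1.toList.getD 0 ' '
        · rw [if_pos hca]
          simp only [List.mem_append, List.mem_singleton]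
          constructor
          · rintro (h | h)
            · rw [hca]; exact Or.inl h
            · exact Or.inr ⟨h.symm, hlen, Or.inl hca.symm⟩
          · rintro (h | ⟨h, _, _⟩)
            · rw [hca] at h; exact Or.inl h
            · exact Or.inr h.symm
        · rw [if_neg hca]
          constructor
          · exact fun h => Or.inl h
          · rintro (h | ⟨_, _, (h | h)⟩)
            · exact h
            · exact absurd h.symm hca
            · exact absurd h.symm hcb
    · rw [if_neg hba]
      rw [not_not] at hba
      simp only [PySem.Dict.getD_insert]
      by_cases hca : c = si.1.toList.getD 0 ' '
      · rw [if_pos hca]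
        simp only [List.mem_append, List.mem_singleton]
        constructor
        · rintro (h | h)
          · rw [hca]; exact Or.inl h
          · exact Or.inr ⟨h.symm, hlen, Or.inl hca.symm⟩
        · rintro (h | ⟨h, _, _⟩)
          · rw [hca] at h; exact Or.inl h
          · exact Or.inr h.symm
      · rw [if_neg hca]
        constructor
        · exact fun h => Or.inl h
        · rintro (h | ⟨_, _, (h | h)⟩)
          · exact h
          · exact absurd h.symm hca
          · exact absurd (hba ▸ h).symm hca
  · have he : pvBStep d si = d := by
      unfold pvBStep
      rw [if_neg hlen]
    rw [he]
    constructor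
    · exact fun h => Or.inl h
    · rintro (h | ⟨_, hl, _⟩)
      · exact h
      · exact absurd hl hlen

lemma pv_bucket_fold_mem (l : List (String × Nat)) :
    ∀ (d : PySem.Dict Char (List Nat)) (c : Char) (j : Nat),
      j ∈ (l.foldl pvBStep d).getD c [] ↔
        j ∈ d.getD c [] ∨ ∃ si ∈ l, si.2 = j ∧ 2 ≤ si.1.toList.length ∧
          (si.1.toList.getD 0 ' ' = c ∨ si.1.toList.getD 1 ' ' = c) := by
  induction l with
  | nil => intro d c j; simp
  | cons si l ih =>
    intro d c j
    simp only [List.foldl_cons]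
    rw [ih, pv_bucket_step_mem]
    simp only [List.mem_cons]
    constructor
    · rintro ((h | h) | ⟨t, ht, h⟩)
      · exact Or.inl h
      · exact Or.inr ⟨si, Or.inl rfl, h⟩
      · exact Or.inr ⟨t, Or.inr ht, h⟩
    · rintro (h | ⟨t, (rfl | ht), h⟩)
      · exact Or.inl (Or.inl h)
      · exact Or.inl (Or.inr h)
      · exact Or.inr ⟨t, ht, h⟩

lemma pv_bucket_mem (cs : List String) (c : Char) (j : Nat) :
    j ∈ (cs.zipIdx.foldl pvBStep PySem.Dict.empty).getD c [] ↔
      (j < cs.length ∧ 2 ≤ (cs.getD j "").toList.length ∧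
        ((cs.getD j "").toList.getD 0 ' ' = c ∨ (cs.getD j "").toList.getD 1 ' ' = c)) := by
  rw [pv_bucket_fold_mem]
  rw [PySem.Dict.getD_empty]
  simp only [List.mem_nil_iff, false_or]
  constructor
  · rintro ⟨si, hmem, rfl, h⟩
    rw [List.mem_iff_getElem?] at hmem
    obtain ⟨k, hk⟩ := hmem
    rw [List.getElem?_zipIdx] at hk
    cases hcs : cs[k]? with
    | none => rw [hcs] at hk; simp at hk
    | some s =>
      rw [hcs] at hk
      simp only [Option.map_some, Option.some_inj] at hk
      have hk2 : si.2 = k := by rw [← hk]; simp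
      have hk1 : si.1 = s := by rw [← hk]
      have hklt : k < cs.length := (List.getElem?_eq_some_iff.mp hcs).1
      have hs : cs[k] = s := by
        have := List.getElem?_eq_some_iff.mp hcs
        exact this.2
      rw [hk2]
      refine ⟨hklt, ?_⟩
      rw [List.getD_eq_getElem cs "" hklt, hs, ← hk1]
      exact h
  · rintro ⟨hj, h⟩
    rw [List.getD_eq_getElem cs "" hj] at h
    refine ⟨(cs[j], j), ?_, rfl, h⟩
    rw [List.mem_iff_getElem?]
    refine ⟨j, ?_⟩
    rw [List.getElem?_zipIdx, List.getElem?_eq_some_iff.mpr ⟨hj, rfl⟩]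
    simp

-- the row B builds at index k (the port's loop body, with the buckets inlined)
def pvBRow (cs : List String) (si : String × Nat) : List Int :=
  if 2 ≤ si.1.toList.length then
    (((PySem.List.sorted
        (PySem.Set.ofList
          ((cs.zipIdx.foldl pvBStep PySem.Dict.empty).getD (si.1.toList.getD 0 ' ') [] ++
           (cs.zipIdx.foldl pvBStep PySem.Dict.empty).getD (si.1.toList.getD 1 ' ') []))
        (fun x => x) false).filter (fun j => si.2 < j)).take 2).foldl
      (fun r j => r.set j 1) (List.replicate cs.length (0 : Int))
  else List.replicate cs.length (0 : Int)

-- two strictly increasing Nat lists with the same members are equal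
lemma pv_sorted_ext (l₁ l₂ : List Nat) (h₁ : l₁.Pairwise (· < ·)) (h₂ : l₂.Pairwise (· < ·))
    (hm : ∀ x, x ∈ l₁ ↔ x ∈ l₂) : l₁ = l₂ := by
  have hn₁ : l₁.Nodup := h₁.imp (fun h => Nat.ne_of_lt h)
  have hn₂ : l₂.Nodup := h₂.imp (fun h => Nat.ne_of_lt h)
  exact List.Perm.eq_of_pairwise (fun a b _ _ hab hba => le_antisymm hab hba)
    (h₁.imp le_of_lt) (h₂.imp le_of_lt) ((List.perm_ext_iff_of_nodup hn₁ hn₂).mpr hm)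

lemma pv_row_eq (cs : List String) (k : Nat) (hk : k < cs.length) :
    pvBRow cs (cs[k], k) = pvRow cs k := by
  have hgd : cs.getD k "" = cs[k] := List.getD_eq_getElem cs "" hk
  unfold pvBRow pvRow pvSetOnes
  by_cases hlen : 2 ≤ (cs[k] : String).toList.length
  · rw [if_pos hlen]
    have hfil :
        ((PySem.List.sorted
          (PySem.Set.ofList
            ((cs.zipIdx.foldl pvBStep PySem.Dict.empty).getD ((cs[k] : String).toList.getD 0 ' ') [] ++
             (cs.zipIdx.foldl pvBStep PySem.Dict.empty).getD ((cs[k] : String).toList.getD 1 ' ') []))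
          (fun x => x) false).filter (fun j => k < j))
        = (List.range' (k + 1) (cs.length - (k + 1))).filter (pvP cs k) := by
      apply pv_sorted_ext
      · exact (PySem.List.sorted_ofList_pairwise_lt _).filter _
      · exact (List.pairwise_lt_range' 1).filter _
      · intro j
        rw [List.mem_filter, List.mem_filter]
        rw [(PySem.List.sorted_perm _ _ _).mem_iff, PySem.Set.mem_ofList, List.mem_append,
          pv_bucket_mem, pv_bucket_mem]
        constructor
        · rintro ⟨hbk, hkj⟩
          have hkj' : k < j := by simpa using hkj
          have hjlt : j < cs.length := by rcases hbk with h | h <;> exact h.1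
          have hjlen : 2 ≤ (cs.getD j "").toList.length := by rcases hbk with h | h <;> exact h.2.1
          refine ⟨List.mem_range'.mpr ⟨j - (k + 1), by omega, by omega⟩, ?_⟩
          unfold pvP
          rw [decide_eq_true_eq]
          refine ⟨⟨by rw [hgd]; exact hlen, hjlen⟩, ?_⟩
          rcases hbk with ⟨_, _, (h | h)⟩ | ⟨_, _, (h | h)⟩
          · exact Or.inl (by rw [hgd]; exact h.symm)
          · exact Or.inr (Or.inr (Or.inr (by rw [hgd]; exact h.symm)))
          · exact Or.inr (Or.inr (Or.inl (by rw [hgd]; exact h.symm)))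
          · exact Or.inr (Or.inl (by rw [hgd]; exact h.symm))
        · rintro ⟨hr, hp⟩
          obtain ⟨t, htl, rfl⟩ := List.mem_range'.mp hr
          unfold pvP at hp
          rw [decide_eq_true_eq] at hp
          obtain ⟨⟨_, hjlen⟩, hor⟩ := hp
          rw [hgd] at hor
          have hjlt : k + 1 + 1 * t < cs.length := by omega
          refine ⟨?_, by simp; omega⟩
          rcases hor with h | h | h | h
          · exact Or.inl ⟨hjlt, hjlen, Or.inl h.symm⟩
          · exact Or.inr ⟨hjlt, hjlen, Or.inr h.symm⟩
          · exact Or.inr ⟨hjlt, hjlen, Or.inl h.symm⟩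
          · exact Or.inl ⟨hjlt, hjlen, Or.inr h.symm⟩
    rw [hfil]
  · rw [if_neg hlen]
    have hnil : (List.range' (k + 1) (cs.length - (k + 1))).filter (pvP cs k) = [] := by
      apply List.filter_eq_nil_iff.mpr
      intro j _
      unfold pvP
      rw [decide_eq_true_eq]
      rintro ⟨⟨h, _⟩, _⟩
      rw [hgd] at h
      exact hlen h
    rw [hnil]
    rfl

-- B computes pvRow at every index
lemma pvB_char (cs : List String) :
    crearmatrizAdyacencia_alt cs = (List.range cs.length).map (pvRow cs) := by
  have h0 : crearmatrizAdyacencia_alt cs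
      = cs.zipIdx.foldl (fun matriz si => matriz ++ [pvBRow cs si]) [] := rfl
  rw [h0, PySem.List.foldl_append_singleton_eq_map, List.nil_append]
  apply List.ext_getElem?
  intro k
  rw [List.getElem?_map, List.getElem?_zipIdx, List.getElem?_map]
  by_cases hk : k < cs.length
  · rw [List.getElem?_eq_some_iff.mpr ⟨hk, rfl⟩, List.getElem?_range hk]
    simp only [Option.map_some, Option.some_inj, Nat.zero_add]
    exact pv_row_eq cs k hk
  · rw [List.getElem?_eq_none (by simpa using hk), List.getElem?_eq_none (by simpa using hk)]
    rfl

-- ===== VERDICT (by name: the statement is the Claim_ definition above) =====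
theorem crearmatrizAdyacencia_spec : Claim_equal_crearmatrizAdyacencia := by
  intro cs _
  unfold Spec_crearmatrizAdyacencia
  rw [pvA_char, pvB_char]
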